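-- pv_equiv track=rewrite | github.com/Kalyan-udd/DSA-data-structures-and-algorithms- | leetcode/smaller_than_currect.py | smaller_than_current
-- ===== SOURCE A (Python) =====
-- def smaller_than_current(nums):
--     ans = []
--     for i in nums:
--         count = 0
--         for j in nums:
--             if i>j:
--                 count+=1
--         ans.append(count)
--     return ans
-- ===== SOURCE B (Python) =====
-- def smaller_than_current(nums):
--     rank = {}
--     for idx, v in enumerate(sorted(nums)):
--         if v not in rank:
--             rank[v] = idx
--     return [rank[v] for v in nums]
-- ===== Notes on version B (the rewrite author's own statement) =====
-- stated objective: faster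
-- what changed: Replaced the O(n^2) nested count loop by sorting once and mapping each value to the index of its first occurrence in the sorted list (its strictly-smaller count) via a dictionary.
import Mathlib
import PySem

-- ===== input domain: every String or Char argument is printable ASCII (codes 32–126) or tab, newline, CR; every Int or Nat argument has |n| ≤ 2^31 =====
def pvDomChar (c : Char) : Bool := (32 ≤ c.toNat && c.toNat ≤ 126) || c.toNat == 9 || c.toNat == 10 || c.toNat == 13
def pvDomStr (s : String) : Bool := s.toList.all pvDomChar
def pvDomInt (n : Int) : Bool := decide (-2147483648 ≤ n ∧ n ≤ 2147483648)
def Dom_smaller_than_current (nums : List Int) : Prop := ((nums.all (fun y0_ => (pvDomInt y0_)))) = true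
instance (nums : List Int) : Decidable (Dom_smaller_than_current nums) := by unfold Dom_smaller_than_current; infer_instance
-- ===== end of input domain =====

-- ===== PORT A =====
-- Literal port of A: for each i, scan nums counting j with i > j, appending counts.
def smaller_than_current (nums : List Int) : List Int :=
  nums.foldl (fun ans i =>
    ans ++ [nums.foldl (fun count j => if i > j then count + 1 else count) 0]) []

-- ===== PORT B =====
-- Port of B (Source B): sort once; first-occurrence index of each value in the sorted list
-- is its strictly-smaller count.  rank[v] in Python always succeeds (v ∈ sorted nums),
-- so the lookup is ported as getD with an unreachable default.
def smaller_than_current_alt (nums : List Int) : List Int :=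
  let s := PySem.List.sorted nums (fun x => x) false
  let rank := (PySem.List.enumerate s 0).foldl
      (fun r p => if r.contains p.2 then r else r.insert p.2 p.1) PySem.Dict.empty
  nums.map (fun v => rank.getD v 0)

-- ===== PRECONDITION & SPEC =====
def Spec_smaller_than_current (nums : List Int) (out : List Int) : Prop := out = smaller_than_current_alt nums
instance (nums : List Int) (out : List Int) : Decidable (Spec_smaller_than_current nums out) := by unfold Spec_smaller_than_current; infer_instance

-- ===== CLAIM (what is proved, stated in full; the proofs are below) =====
def Claim_equal_smaller_than_current : Prop := ∀ (nums : List Int), Dom_smaller_than_current nums → Spec_smaller_than_current nums (smaller_than_current nums)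

-- ===== LEMMAS AND PROOFS =====

-- ===== VERDICT (by name: the statement is the Claim_ definition above) =====

-- A's inner loop is a countP.
lemma inner_count (i : Int) : ∀ (l : List Int) (c : Int),
    l.foldl (fun count j => if i > j then count + 1 else count) c
      = c + (l.countP (fun j => decide (j < i)) : Int) := by
  intro l
  induction l with
  | nil => intro c; simp
  | cons x t ih =>
    intro c
    by_cases h : i > x
    · simp [List.foldl_cons, h, ih]
      ring
    · simp [List.foldl_cons, h, ih]

-- A's outer loop is a map.
lemma outer_map (g : Int → Int) : ∀ (l : List Int) (acc : List Int),
    l.foldl (fun ans i => ans ++ [g i]) acc = acc ++ l.map g := by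
  intro l
  induction l with
  | nil => intro acc; simp
  | cons x t ih => intro acc; simp [List.foldl_cons, ih]

-- The rank-building fold never disturbs an existing binding.
lemma rank_preserve : ∀ (s : List Int) (k : Int) (d : PySem.Dict Int Int) (key : Int),
    d.contains key = true →
    ((PySem.List.enumerate s k).foldl
        (fun r p => if r.contains p.2 then r else r.insert p.2 p.1) d).get? key
      = d.get? key := by
  intro s
  induction s with
  | nil => intro k d key _; simp [PySem.List.enumerate_nil]
  | cons x t ih =>
    intro k d key hk
    rw [PySem.List.enumerate_cons]
    simp only [List.foldl_cons]
    by_cases hx : d.contains x = true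
    · simp only [hx, if_true]
      exact ih _ _ _ hk
    · simp only [eq_false_of_ne_true hx, Bool.false_eq_true, if_false]
      have hne : key ≠ x := fun h => hx (h ▸ hk)
      have hk' : (d.insert x k).contains key = true := by
        rw [PySem.Dict.contains_insert, hk]; simp
      rw [ih _ _ _ hk', PySem.Dict.get?_insert_of_ne d k hne]

-- On a nondecreasing list, the fold maps each member v to k + (count of elements < v).
lemma rank_lookup : ∀ (s : List Int) (k : Int) (d : PySem.Dict Int Int),
    s.Pairwise (· ≤ ·) → ∀ v ∈ s, d.contains v = false →
    ((PySem.List.enumerate s k).foldl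
        (fun r p => if r.contains p.2 then r else r.insert p.2 p.1) d).get? v
      = some (k + (s.countP (fun j => decide (j < v)) : Int)) := by
  intro s
  induction s with
  | nil => intro k d _ v hv; exact absurd hv (List.not_mem_nil)
  | cons x t ih =>
    intro k d hp v hv hd
    have hle : ∀ y ∈ t, x ≤ y := (List.pairwise_cons.mp hp).1
    have hpt : t.Pairwise (· ≤ ·) := (List.pairwise_cons.mp hp).2
    rw [PySem.List.enumerate_cons]
    simp only [List.foldl_cons]
    by_cases hdx : d.contains x = true
    · -- x is already bound, so v ≠ x; the step leaves d unchanged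
      have hvx : v ≠ x := fun h => by rw [h, hdx] at hd; exact Bool.noConfusion hd
      have hvt : v ∈ t := (List.mem_cons.mp hv).resolve_left hvx
      have hxv : x < v := lt_of_le_of_ne (hle v hvt) (fun h => hvx h.symm)
      simp only [hdx, if_true]
      rw [ih (k+1) d hpt v hvt hd]
      have : (x :: t).countP (fun j => decide (j < v))
           = t.countP (fun j => decide (j < v)) + 1 := by
        simp [hxv]
      rw [this]; congr 1; push_cast; ring
    · simp only [eq_false_of_ne_true hdx, Bool.false_eq_true, if_false]
      by_cases hvx : v = x
      · subst hvx
        have hcnt : (v :: t).countP (fun j => decide (j < v)) = 0 := by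
          rw [List.countP_eq_zero]
          intro a ha
          simp only [decide_eq_true_eq]
          rcases List.mem_cons.mp ha with h | h
          · omega
          · exact not_lt.mpr (hle a h)
        rw [rank_preserve t (k+1) _ v (PySem.Dict.contains_insert_self d v k),
            PySem.Dict.get?_insert_self, hcnt]
        simp
      · have hvt : v ∈ t := (List.mem_cons.mp hv).resolve_left hvx
        have hxv : x < v := lt_of_le_of_ne (hle v hvt) (fun h => hvx h.symm)
        have hd' : (d.insert x k).contains v = false := by
          rw [PySem.Dict.contains_insert, hd]
          simp [hvx]
        rw [ih (k+1) _ hpt v hvt hd']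
        have : (x :: t).countP (fun j => decide (j < v))
             = t.countP (fun j => decide (j < v)) + 1 := by
          simp [hxv]
        rw [this]; congr 1; push_cast; ring

theorem smaller_than_current_spec : Claim_equal_smaller_than_current := by
  intro nums _
  unfold Spec_smaller_than_current smaller_than_current smaller_than_current_alt
  rw [outer_map _ nums []]
  simp only [List.nil_append]
  apply List.map_congr_left
  intro v hv
  rw [inner_count v nums 0]
  have hvs : v ∈ PySem.List.sorted nums (fun x => x) false :=
    (PySem.List.mem_sorted nums (fun x => x) false v).mpr hv
  have hp : (PySem.List.sorted nums (fun x => x) false).Pairwise (· ≤ ·) :=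
    PySem.List.sorted_pairwise nums (fun x => x)
  rw [PySem.Dict.getD_eq_get?_getD,
      rank_lookup _ 0 PySem.Dict.empty hp v hvs (PySem.Dict.contains_empty v)]
  have hperm : (PySem.List.sorted nums (fun x => x) false).Perm nums :=
    PySem.List.sorted_perm nums (fun x => x) false
  rw [hperm.countP_eq]
  simp
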